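-- pv_equiv track=rewrite | github.com/svlys/youtu-parsing | youtu_parsing_utils/table_utils.py | pack_to_html_str
-- ===== SOURCE A (Python) =====
-- def get_colspan(cell_structure, row_idx, col_idx, cell_id):
--     """Count how many columns this cell spans horizontally."""
--     next_col = col_idx + 1
--     row = cell_structure[row_idx]
--     while next_col < len(row) and row[next_col] == cell_id:
--         next_col += 1
--     return next_col - col_idx
--
-- def get_rowspan(cell_structure, row_idx, col_idx, cell_id):
--     """Count how many rows this cell spans vertically."""
--     next_row = row_idx + 1
--     while next_row < len(cell_structure) and cell_structure[next_row][col_idx] == cell_id: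
--         next_row += 1
--     return next_row - row_idx
--
-- def make_td(cell_id, cell_text, rowspan, colspan):
--     """Compose the <td> string for this cell."""
--     attrs = []
--     if rowspan > 1:
--         attrs.append(f'rowspan="{rowspan}"')
--     if colspan > 1:
--         attrs.append(f'colspan="{colspan}"')
--     attr_str = (' ' + ' '.join(attrs)) if attrs else ''
--     return f'<td{attr_str}>{cell_text}</td>'
--
-- def pack_to_html_str(cell_structure, cell_content):
--     """
--     Convert cell structure and content mapping into an HTML table string.
--
--     Args:
--         cell_structure (List[List[int]]): Table cell ID structure matrix.
--         cell_content (Dict[int, str]): Cell ID to text content mapping.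
--
--     Returns:
--         str: HTML table string.
--     """
--     used_cell_ids = set()
--     html_parts = ['<table>']
--
--     for row_idx, row in enumerate(cell_structure):
--         html_parts.append('<tr>')
--         for col_idx, cell_id in enumerate(row):
--             # Skip already rendered merged cells
--             if cell_id in used_cell_ids:
--                 continue
--
--             # Mark this cell ID as rendered (if valid)
--             if cell_id != -1:
--                 used_cell_ids.add(cell_id)
--
--             # Calculate colspan/rowspan
--             colspan = get_colspan(cell_structure, row_idx, col_idx, cell_id)
--             rowspan = get_rowspan(cell_structure, row_idx, col_idx, cell_id)
--
--             # If invalid ID, span is always 1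
--             if cell_id == -1:
--                 colspan = 1
--                 rowspan = 1
--
--             cell_text = cell_content.get(cell_id, '')
--
--             td_html = make_td(cell_id, cell_text, rowspan, colspan)
--             html_parts.append(td_html)
--         html_parts.append('</tr>')
--     html_parts.append('</table>')
--     return ''.join(html_parts)
-- ===== SOURCE B (Python) =====
-- def pack_to_html_str(cell_structure, cell_content):
--     # Precompute run-length tables, then render in one pass.
--     # right_run[r][c]: length of the run of equal values starting at (r,c) going right.
--     right_run = []
--     for row in cell_structure:
--         n = len(row)
--         rr = [1] * n
--         for c in range(n - 2, -1, -1):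
--             if row[c] == row[c + 1]:
--                 rr[c] = rr[c + 1] + 1
--         right_run.append(rr)
--     # down_run[r][c]: length of the run of equal values starting at (r,c) going down.
--     down_run = [None] * len(cell_structure)
--     prev_row = None
--     prev_d = None
--     for r in range(len(cell_structure) - 1, -1, -1):
--         row = cell_structure[r]
--         d = []
--         for c, v in enumerate(row):
--             if prev_row is not None and c < len(prev_row) and prev_row[c] == v:
--                 d.append(prev_d[c] + 1)
--             else:
--                 d.append(1)
--         down_run[r] = d
--         prev_row = row
--         prev_d = d
--     used = set()
--     parts = ['<table>']
--     for r, row in enumerate(cell_structure):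
--         parts.append('<tr>')
--         for c, cid in enumerate(row):
--             if cid in used:
--                 continue
--             if cid != -1:
--                 used.add(cid)
--             colspan = 1 if cid == -1 else right_run[r][c]
--             rowspan = 1 if cid == -1 else down_run[r][c]
--             attrs = []
--             if rowspan > 1:
--                 attrs.append(f'rowspan="{rowspan}"')
--             if colspan > 1:
--                 attrs.append(f'colspan="{colspan}"')
--             attr_str = (' ' + ' '.join(attrs)) if attrs else ''
--             parts.append(f'<td{attr_str}>{cell_content.get(cid, "")}</td>')
--         parts.append('</tr>')
--     parts.append('</table>')
--     return ''.join(parts)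
-- ===== Notes on version B (the rewrite author's own statement) =====
-- stated objective: alternative
-- what changed: Replaces A's per-cell directional while-scans (get_colspan/get_rowspan re-scan right and down at every rendered cell) by two run-length tables built in one backward pass each (right-run per row, down-run per column bottom-up), then a single rendering pass looks the spans up.
import Mathlib
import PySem

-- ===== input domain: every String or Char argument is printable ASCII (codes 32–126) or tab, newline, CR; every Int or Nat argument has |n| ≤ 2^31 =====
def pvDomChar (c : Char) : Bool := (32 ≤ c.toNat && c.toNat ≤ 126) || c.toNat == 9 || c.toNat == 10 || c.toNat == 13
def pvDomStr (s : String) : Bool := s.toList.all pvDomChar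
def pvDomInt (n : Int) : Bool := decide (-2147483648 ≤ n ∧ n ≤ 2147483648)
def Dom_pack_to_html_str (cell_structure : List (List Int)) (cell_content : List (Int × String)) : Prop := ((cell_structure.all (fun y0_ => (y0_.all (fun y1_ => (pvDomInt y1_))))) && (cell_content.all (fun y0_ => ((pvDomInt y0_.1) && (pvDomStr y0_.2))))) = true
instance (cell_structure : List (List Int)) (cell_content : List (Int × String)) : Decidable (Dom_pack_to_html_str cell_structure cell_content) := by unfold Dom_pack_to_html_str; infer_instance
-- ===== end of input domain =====

-- B replaces A's per-cell directional while-scans by two precomputed run-length tables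
-- (right/down runs) built in one backward pass each, then renders in a single pass
-- (objective: alternative decomposition, same asymptotic cost).

-- ===== PORT A =====
-- while next_col < len(row) and row[next_col] == cell_id: next_col += 1
def colspanLoop (row : List Int) (cell_id : Int) (next_col : Nat) : Nat :=
  if h : next_col < row.length ∧ row.getD next_col 0 = cell_id then
    colspanLoop row cell_id (next_col + 1)
  else next_col
termination_by row.length - next_col
decreasing_by omega

def get_colspan (cell_structure : List (List Int)) (row_idx col_idx : Nat) (cell_id : Int) : Nat :=
  colspanLoop (cell_structure.getD row_idx []) cell_id (col_idx + 1) - col_idx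

-- while next_row < len(cell_structure) and cell_structure[next_row][col_idx] == cell_id: next_row += 1
def rowspanLoop (cell_structure : List (List Int)) (col_idx : Nat) (cell_id : Int) (next_row : Nat) : Nat :=
  if h : next_row < cell_structure.length ∧ (cell_structure.getD next_row []).getD col_idx 0 = cell_id then
    rowspanLoop cell_structure col_idx cell_id (next_row + 1)
  else next_row
termination_by cell_structure.length - next_row
decreasing_by omega

def get_rowspan (cell_structure : List (List Int)) (row_idx col_idx : Nat) (cell_id : Int) : Nat :=
  rowspanLoop cell_structure col_idx cell_id (row_idx + 1) - row_idx

def make_td (_cell_id : Int) (cell_text : String) (rowspan colspan : Nat) : String :=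
  let attrs : List String :=
    (if rowspan > 1 then [PySem.Str.join "" ["rowspan=\"", PySem.Int.toStr (rowspan : Int), "\""]] else []) ++
    (if colspan > 1 then [PySem.Str.join "" ["colspan=\"", PySem.Int.toStr (colspan : Int), "\""]] else [])
  let attr_str : String := if attrs.length > 0 then PySem.Str.join "" [" ", PySem.Str.join " " attrs] else ""
  PySem.Str.join "" ["<td", attr_str, ">", cell_text, "</td>"]

-- inner 'for col_idx, cell_id in enumerate(row)' (cells is the remaining suffix of the row)
def rowLoopA (cell_structure : List (List Int)) (cell_content : List (Int × String))
    (row_idx col_idx : Nat) (cells : List Int) (used : PySem.Set Int) (parts : List String) :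
    PySem.Set Int × List String :=
  match cells with
  | [] => (used, parts)
  | cell_id :: rest =>
    if PySem.Set.contains used cell_id then
      rowLoopA cell_structure cell_content row_idx (col_idx + 1) rest used parts
    else
      let used1 := if cell_id ≠ -1 then PySem.Set.add used cell_id else used
      let colspan := get_colspan cell_structure row_idx col_idx cell_id
      let rowspan := get_rowspan cell_structure row_idx col_idx cell_id
      let colspan1 := if cell_id = -1 then 1 else colspan
      let rowspan1 := if cell_id = -1 then 1 else rowspan
      let cell_text := PySem.Dict.getD (PySem.Dict.mk cell_content) cell_id ""
      rowLoopA cell_structure cell_content row_idx (col_idx + 1) rest used1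
        (parts ++ [make_td cell_id cell_text rowspan1 colspan1])

-- outer 'for row_idx, row in enumerate(cell_structure)'
def tableLoopA (cell_structure : List (List Int)) (cell_content : List (Int × String))
    (row_idx : Nat) (rows : List (List Int)) (used : PySem.Set Int) (parts : List String) :
    PySem.Set Int × List String :=
  match rows with
  | [] => (used, parts)
  | row :: rrest =>
    let res := rowLoopA cell_structure cell_content row_idx 0 row used (parts ++ ["<tr>"])
    tableLoopA cell_structure cell_content (row_idx + 1) rrest res.1 (res.2 ++ ["</tr>"])

def pack_to_html_str (cell_structure : List (List Int)) (cell_content : List (Int × String)) : String :=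
  let res := tableLoopA cell_structure cell_content 0 cell_structure (PySem.Set.empty) ["<table>"]
  PySem.Str.join "" (res.2 ++ ["</table>"])

-- ===== PORT B =====
-- right-run table of one row, built right-to-left: rr[c] = rr[c+1]+1 if row[c]==row[c+1] else 1
def rrun : List Int → List Nat
  | [] => []
  | [_] => [1]
  | a :: b :: rest =>
    let t := rrun (b :: rest)
    (if a = b then t.headD 1 + 1 else 1) :: t

-- down-run table, built bottom-up: d[c] = prev_d[c]+1 if next row has a matching value at c else 1
def drun : List (List Int) → List (List Nat)
  | [] => []
  | row :: rest =>
    let t := drun rest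
    let d := row.mapIdx (fun c v =>
      match rest with
      | [] => 1
      | prow :: _ => if c < prow.length ∧ prow.getD c 0 = v then (t.headD []).getD c 1 + 1 else 1)
    d :: t

def rowLoopB (cell_content : List (Int × String)) (right down : List (List Nat))
    (row_idx col_idx : Nat) (cells : List Int) (used : PySem.Set Int) (parts : List String) :
    PySem.Set Int × List String :=
  match cells with
  | [] => (used, parts)
  | cell_id :: rest =>
    if PySem.Set.contains used cell_id then
      rowLoopB cell_content right down row_idx (col_idx + 1) rest used parts
    else
      let used1 := if cell_id ≠ -1 then PySem.Set.add used cell_id else used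
      let colspan := if cell_id = -1 then 1 else (right.getD row_idx []).getD col_idx 1
      let rowspan := if cell_id = -1 then 1 else (down.getD row_idx []).getD col_idx 1
      let attrs : List String :=
        (if rowspan > 1 then [PySem.Str.join "" ["rowspan=\"", PySem.Int.toStr (rowspan : Int), "\""]] else []) ++
        (if colspan > 1 then [PySem.Str.join "" ["colspan=\"", PySem.Int.toStr (colspan : Int), "\""]] else [])
      let attr_str : String := if attrs.length > 0 then PySem.Str.join "" [" ", PySem.Str.join " " attrs] else ""
      let td := PySem.Str.join "" ["<td", attr_str, ">", PySem.Dict.getD (PySem.Dict.mk cell_content) cell_id "", "</td>"]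
      rowLoopB cell_content right down row_idx (col_idx + 1) rest used1 (parts ++ [td])

def tableLoopB (cell_content : List (Int × String)) (right down : List (List Nat))
    (row_idx : Nat) (rows : List (List Int)) (used : PySem.Set Int) (parts : List String) :
    PySem.Set Int × List String :=
  match rows with
  | [] => (used, parts)
  | row :: rrest =>
    let res := rowLoopB cell_content right down row_idx 0 row used (parts ++ ["<tr>"])
    tableLoopB cell_content right down (row_idx + 1) rrest res.1 (res.2 ++ ["</tr>"])

def pack_to_html_str_alt (cell_structure : List (List Int)) (cell_content : List (Int × String)) : String :=
  let right := cell_structure.map rrun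
  let down := drun cell_structure
  let res := tableLoopB cell_content right down 0 cell_structure (PySem.Set.empty) ["<table>"]
  PySem.Str.join "" (res.2 ++ ["</table>"])

-- ===== PRECONDITION & SPEC =====
-- how far the downward scan at column c with id cid runs through the given rows
def twCol (c : Nat) (cid : Int) (rows : List (List Int)) : Nat :=
  (rows.takeWhile (fun row => decide (c < row.length) && (row.getD c 0 == cid))).length

-- the downward scan below row r either runs to the bottom or stops at a row long enough to be inspected
def scanSafe (cs : List (List Int)) (r c : Nat) (cid : Int) : Prop :=
  twCol c cid (cs.drop (r + 1)) = (cs.drop (r + 1)).length ∨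
  c < ((cs.drop (r + 1)).getD (twCol c cid (cs.drop (r + 1))) []).length

def priorCells (cs : List (List Int)) (r c : Nat) : List Int :=
  (cs.take r).flatten ++ (cs.getD r []).take c

-- Pre_ excludes exactly the inputs on which A raises IndexError: ragged grids where the
-- downward rowspan scan of some rendered cell (a -1 cell or the first occurrence of its id)
-- runs into a later row that is too short to be indexed at that column.
def Pre_pack_to_html_str (cell_structure : List (List Int)) (cell_content : List (Int × String)) : Prop :=
  ∀ r, r < cell_structure.length → ∀ c, c < (cell_structure.getD r []).length →
    ((cell_structure.getD r []).getD c 0 = -1 ∨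
      (cell_structure.getD r []).getD c 0 ∉ priorCells cell_structure r c) →
    scanSafe cell_structure r c ((cell_structure.getD r []).getD c 0)

instance (cell_structure : List (List Int)) (cell_content : List (Int × String)) : Decidable (Pre_pack_to_html_str cell_structure cell_content) := by
  unfold Pre_pack_to_html_str scanSafe; infer_instance

def pvWitness_pack_to_html_str : List (List Int) × (List (Int × String)) :=
  ([[0, 0], [1, 2]], [(0, "a"), (1, "b")])

def Spec_pack_to_html_str (cell_structure : List (List Int)) (cell_content : List (Int × String)) (out : String) : Prop := out = pack_to_html_str_alt cell_structure cell_content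
instance (cell_structure : List (List Int)) (cell_content : List (Int × String)) (out : String) : Decidable (Spec_pack_to_html_str cell_structure cell_content out) := by unfold Spec_pack_to_html_str; infer_instance

-- ===== CLAIM (what is proved, stated in full; the proofs are below) =====
def Claim_equal_pack_to_html_str : Prop := ∀ (cell_structure : List (List Int)) (cell_content : List (Int × String)), Dom_pack_to_html_str cell_structure cell_content → Pre_pack_to_html_str cell_structure cell_content → Spec_pack_to_html_str cell_structure cell_content (pack_to_html_str cell_structure cell_content)

-- ===== LEMMAS AND PROOFS =====
def twRow (cid : Int) (l : List Int) : Nat := (l.takeWhile (fun x => x == cid)).length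


theorem colspanLoop_eq (row : List Int) (cid : Int) :
    ∀ (n nc : Nat), row.length - nc ≤ n →
      colspanLoop row cid nc = nc + twRow cid (row.drop nc) := by
  intro n
  induction n with
  | zero =>
    intro nc h
    have hlen : row.length ≤ nc := by omega
    rw [colspanLoop, dif_neg (by omega), List.drop_eq_nil_of_le hlen]
    simp [twRow]
  | succ n ih =>
    intro nc h
    by_cases hlt : nc < row.length
    · have hdrop : row.drop nc = row[nc] :: row.drop (nc + 1) := List.drop_eq_getElem_cons hlt
      have hgd : row.getD nc 0 = row[nc] := List.getD_eq_getElem row 0 hlt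
      by_cases hcid : row[nc] = cid
      · rw [colspanLoop, dif_pos ⟨hlt, by rw [hgd, hcid]⟩, ih (nc + 1) (by omega), hdrop]
        simp [twRow, hcid]
        omega
      · rw [colspanLoop, dif_neg (by rw [hgd]; exact fun hc => hcid hc.2), hdrop]
        simp [twRow, hcid]
    · rw [colspanLoop, dif_neg (by omega), List.drop_eq_nil_of_le (by omega)]
      simp [twRow]

theorem twCol_cons_pos (c : Nat) (cid : Int) (row : List Int) (rest : List (List Int))
    (h1 : c < row.length) (h2 : row.getD c 0 = cid) :
    twCol c cid (row :: rest) = twCol c cid rest + 1 := by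
  unfold twCol
  rw [List.takeWhile_cons, if_pos (by simp only [Bool.and_eq_true, decide_eq_true_eq, beq_iff_eq]; exact ⟨h1, h2⟩)]
  simp [Nat.add_comm]

theorem twCol_cons_neg (c : Nat) (cid : Int) (row : List Int) (rest : List (List Int))
    (h : ¬(c < row.length ∧ row.getD c 0 = cid)) :
    twCol c cid (row :: rest) = 0 := by
  unfold twCol
  rw [List.takeWhile_cons, if_neg, List.length_nil]
  intro hb
  simp only [Bool.and_eq_true, decide_eq_true_eq, beq_iff_eq] at hb
  exact h hb

theorem rowspanLoop_eq (cs : List (List Int)) (c : Nat) (cid : Int) :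
    ∀ (n nr : Nat), cs.length - nr ≤ n →
      (twCol c cid (cs.drop nr) = (cs.drop nr).length ∨
        c < ((cs.drop nr).getD (twCol c cid (cs.drop nr)) []).length) →
      rowspanLoop cs c cid nr = nr + twCol c cid (cs.drop nr) := by
  intro n
  induction n with
  | zero =>
    intro nr h _
    have hlen : cs.length ≤ nr := by omega
    rw [rowspanLoop, dif_neg (by omega), List.drop_eq_nil_of_le hlen]
    simp [twCol]
  | succ n ih =>
    intro nr h hsafe
    by_cases hlt : nr < cs.length
    · have hdrop : cs.drop nr = cs[nr] :: cs.drop (nr + 1) := List.drop_eq_getElem_cons hlt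
      have hgd : cs.getD nr [] = cs[nr] := List.getD_eq_getElem cs [] hlt
      by_cases hp : c < cs[nr].length ∧ cs[nr].getD c 0 = cid
      · have htw : twCol c cid (cs.drop nr) = twCol c cid (cs.drop (nr + 1)) + 1 := by
          rw [hdrop]; exact twCol_cons_pos c cid _ _ hp.1 hp.2
        rw [rowspanLoop, dif_pos ⟨hlt, by rw [hgd]; exact hp.2⟩,
          ih (nr + 1) (by omega) ?_, htw]
        · omega
        · rw [hdrop, twCol_cons_pos c cid _ _ hp.1 hp.2] at hsafe
          rcases hsafe with h1 | h1
          · left; rw [List.length_cons] at h1; omega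
          · right; rwa [List.getD_cons_succ] at h1
      · have htw0 : twCol c cid (cs.drop nr) = 0 := by
          rw [hdrop]; exact twCol_cons_neg c cid _ _ hp
        have hclen : c < cs[nr].length := by
          rw [htw0, hdrop] at hsafe
          rcases hsafe with h1 | h1
          · rw [List.length_cons] at h1; omega
          · rwa [List.getD_cons_zero] at h1
        have hne : ¬ cs[nr].getD c 0 = cid := fun h2 => hp ⟨hclen, h2⟩
        rw [rowspanLoop, dif_neg (by rw [hgd]; exact fun hx => hne hx.2), htw0]
        omega
    · rw [rowspanLoop, dif_neg (by omega), List.drop_eq_nil_of_le (by omega)]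
      simp [twCol]

theorem twRow_cons (cid a : Int) (l : List Int) :
    twRow cid (a :: l) = if a = cid then twRow cid l + 1 else 0 := by
  unfold twRow
  rw [List.takeWhile_cons]
  by_cases h : a = cid
  · rw [if_pos h, if_pos (by simp [h])]; simp [Nat.add_comm]
  · rw [if_neg h, if_neg (by simp [h])]; rfl

theorem rrun_getD (l : List Int) :
    ∀ c, c < l.length → (rrun l).getD c 1 = 1 + twRow (l.getD c 0) (l.drop (c + 1)) := by
  induction l with
  | nil => intro c hc; simp at hc
  | cons a tl ih =>
    intro c hc
    match tl, c with
    | [], 0 => simp [rrun, twRow]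
    | [], c + 1 => simp at hc
    | b :: rest, 0 =>
      have hhead : (rrun (b :: rest)).headD 1 = (rrun (b :: rest)).getD 0 1 := by
        cases h : rrun (b :: rest) <;> simp
      show (rrun (a :: b :: rest)).getD 0 1 = _
      rw [show rrun (a :: b :: rest) = (if a = b then (rrun (b :: rest)).headD 1 + 1 else 1) :: rrun (b :: rest) from rfl]
      rw [List.getD_cons_zero, hhead, ih 0 (by simp)]
      simp only [List.getD_cons_zero, List.drop_succ_cons, List.drop_zero, twRow_cons]
      by_cases hab : a = b
      · rw [if_pos hab, if_pos (by rw [hab]), hab]; omega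
      · rw [if_neg hab, if_neg (fun h => hab (Eq.symm h))]
    | b :: rest, c + 1 =>
      show (rrun (a :: b :: rest)).getD (c + 1) 1 = _
      rw [show rrun (a :: b :: rest) = (if a = b then (rrun (b :: rest)).headD 1 + 1 else 1) :: rrun (b :: rest) from rfl]
      rw [List.getD_cons_succ, ih (c) (by simpa using hc)]
      simp

theorem drun_cons (row : List Int) (rest : List (List Int)) :
    drun (row :: rest) = (row.mapIdx (fun c v =>
      match rest with
      | [] => 1
      | prow :: _ => if c < prow.length ∧ prow.getD c 0 = v then ((drun rest).headD []).getD c 1 + 1 else 1)) :: drun rest := by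
  rw [drun]

theorem drun_getD : ∀ (cs : List (List Int)) (r c : Nat), r < cs.length →
    c < (cs.getD r []).length →
    ((drun cs).getD r []).getD c 1 = 1 + twCol c ((cs.getD r []).getD c 0) (cs.drop (r + 1)) := by
  intro cs
  induction cs with
  | nil => intro r c hr; simp at hr
  | cons row rest ih =>
    intro r c hr hc
    match r with
    | r + 1 =>
      rw [drun_cons, List.getD_cons_succ, List.getD_cons_succ, List.drop_succ_cons]
      exact ih r c (by simpa using hr) (by simpa using hc)
    | 0 =>
      rw [List.getD_cons_zero] at hc ⊢
      rw [drun_cons, List.getD_cons_zero, List.drop_succ_cons, List.drop_zero]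
      cases rest with
      | nil =>
        have hlen : c < (row.mapIdx (fun _ _ => (1 : Nat))).length := by
          rw [List.length_mapIdx]; exact hc
        rw [show (row.mapIdx (fun c v =>
          match ([] : List (List Int)) with
          | [] => 1
          | prow :: _ => if c < prow.length ∧ prow.getD c 0 = v then ((drun []).headD []).getD c 1 + 1 else 1)) = row.mapIdx (fun _ _ => (1 : Nat)) from rfl]
        rw [List.getD_eq_getElem _ 1 hlen, List.getElem_mapIdx]
        simp [twCol]
      | cons prow rest' =>
        have hlen : c < (row.mapIdx (fun c v =>
          if c < prow.length ∧ prow.getD c 0 = v then ((drun (prow :: rest')).headD []).getD c 1 + 1 else 1)).length := by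
          rw [List.length_mapIdx]; exact hc
        rw [show (row.mapIdx (fun c v =>
          match prow :: rest' with
          | [] => 1
          | prow :: _ => if c < prow.length ∧ prow.getD c 0 = v then ((drun (prow :: rest')).headD []).getD c 1 + 1 else 1)) = row.mapIdx (fun c v =>
          if c < prow.length ∧ prow.getD c 0 = v then ((drun (prow :: rest')).headD []).getD c 1 + 1 else 1) from rfl]
        rw [List.getD_eq_getElem _ 1 hlen, List.getElem_mapIdx]
        have hrowc : row.getD c 0 = row[c] := List.getD_eq_getElem row 0 hc
        by_cases hp : c < prow.length ∧ prow.getD c 0 = row[c]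
        · simp only [hp, and_self, if_true]
          have hhead : (drun (prow :: rest')).headD [] = (drun (prow :: rest')).getD 0 [] := by
            cases h : drun (prow :: rest') <;> simp
          rw [hhead, ih 0 c (by simp) (by simpa using hp.1)]
          rw [List.getD_cons_zero, List.drop_succ_cons, List.drop_zero] at *
          rw [hrowc, twCol_cons_pos c row[c] prow rest' hp.1 hp.2, hp.2]
          omega
        · rw [if_neg hp, hrowc, twCol_cons_neg c row[c] prow rest' hp]


theorem contains_add_of_contains {s : PySem.Set Int} {x y : Int}
    (h : PySem.Set.contains s x = true) : PySem.Set.contains (PySem.Set.add s y) x = true := by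
  rw [PySem.Set.contains_iff] at *
  exact (PySem.Set.mem_add s y x).mpr (Or.inl h)

theorem contains_add_self (s : PySem.Set Int) (x : Int) :
    PySem.Set.contains (PySem.Set.add s x) x = true := by
  rw [PySem.Set.contains_iff]
  exact (PySem.Set.mem_add s x x).mpr (Or.inr rfl)

theorem rowLoop_eq (cs : List (List Int)) (content : List (Int × String))
    (hpre : Pre_pack_to_html_str cs content) :
    ∀ (cells : List Int) (r c : Nat) (used : PySem.Set Int) (parts : List String),
      r < cs.length → (cs.getD r []).drop c = cells →
      (∀ x : Int, x ≠ -1 → x ∈ priorCells cs r c → PySem.Set.contains used x = true) →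
      rowLoopA cs content r c cells used parts = rowLoopB content (cs.map rrun) (drun cs) r c cells used parts ∧
      (∀ x : Int, x ≠ -1 → x ∈ priorCells cs r (c + cells.length) →
        PySem.Set.contains (rowLoopA cs content r c cells used parts).1 x = true) := by
  intro cells
  induction cells with
  | nil =>
    intro r c used parts hr hdrop hinv
    refine ⟨rfl, ?_⟩
    intro x hx hmem
    simp only [rowLoopA]
    exact hinv x hx (by simpa using hmem)
  | cons cid rest ih =>
    intro r c used parts hr hdrop hinv
    have hc : c < (cs.getD r []).length := by
      by_contra h
      rw [List.drop_eq_nil_of_le (by omega)] at hdrop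
      simp at hdrop
    have hsplit : (cs.getD r []).drop c = (cs.getD r [])[c] :: (cs.getD r []).drop (c + 1) :=
      List.drop_eq_getElem_cons hc
    rw [hdrop] at hsplit
    obtain ⟨hcid, hrest⟩ : cid = (cs.getD r [])[c] ∧ rest = (cs.getD r []).drop (c + 1) := by
      have := hsplit
      exact ⟨by injection this, by injection this⟩
    have hidx : c + (cid :: rest).length = (c + 1) + rest.length := by
      simp [List.length_cons]; omega
    have hprior : priorCells cs r (c + 1) = priorCells cs r c ++ [cid] := by
      unfold priorCells
      rw [List.take_succ_eq_append_getElem hc, ← hcid, ← List.append_assoc]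
    by_cases hused : PySem.Set.contains used cid = true
    · have hAB := ih r (c + 1) used parts hr hrest.symm (by
        intro x hx hmem
        rw [hprior] at hmem
        rcases List.mem_append.mp hmem with h1 | h1
        · exact hinv x hx h1
        · rw [List.mem_singleton.mp h1]; exact hused)
      constructor
      · simp only [rowLoopA, rowLoopB, hused, if_true]
        exact hAB.1
      · intro x hx hmem
        rw [hidx] at hmem
        simp only [rowLoopA, hused, if_true]
        exact hAB.2 x hx hmem
    · have hused' : PySem.Set.contains used cid = false := Bool.eq_false_iff.mpr hused
      have hgdc : (cs.getD r []).getD c 0 = cid := by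
        rw [List.getD_eq_getElem _ 0 hc, ← hcid]
      have hcol : ((cs.map rrun).getD r []).getD c 1 = get_colspan cs r c cid := by
        have hmap : (cs.map rrun).getD r [] = rrun (cs.getD r []) := by
          rw [List.getD_eq_getElem _ [] (by simpa using hr), List.getElem_map,
            List.getD_eq_getElem cs [] hr]
        rw [hmap, rrun_getD _ c hc, hgdc]
        unfold get_colspan
        rw [colspanLoop_eq (cs.getD r []) cid ((cs.getD r []).length) (c + 1) (by omega)]
        omega
      have hrowspan : cid ≠ -1 → ((drun cs).getD r []).getD c 1 = get_rowspan cs r c cid := by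
        intro hne
        have hnm : cid ∉ priorCells cs r c := fun hmem => hused (hinv cid hne hmem)
        have hsafe := hpre r hr c hc (Or.inr (by rw [hgdc]; exact hnm))
        unfold scanSafe at hsafe
        rw [hgdc] at hsafe
        rw [drun_getD cs r c hr hc, hgdc]
        unfold get_rowspan
        rw [rowspanLoop_eq cs c cid cs.length (r + 1) (by omega) hsafe]
        omega
      have e1 : (if cid = -1 then 1 else ((cs.map rrun).getD r []).getD c 1)
          = (if cid = -1 then 1 else get_colspan cs r c cid) := by
        by_cases h : cid = -1
        · rw [if_pos h, if_pos h]
        · rw [if_neg h, if_neg h]; exact hcol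
      have e2 : (if cid = -1 then 1 else ((drun cs).getD r []).getD c 1)
          = (if cid = -1 then 1 else get_rowspan cs r c cid) := by
        by_cases h : cid = -1
        · rw [if_pos h, if_pos h]
        · rw [if_neg h, if_neg h]; exact hrowspan h
      have hinv1 : ∀ x : Int, x ≠ -1 → x ∈ priorCells cs r (c + 1) →
          PySem.Set.contains (if cid ≠ -1 then PySem.Set.add used cid else used) x = true := by
        intro x hx hmem
        rw [hprior] at hmem
        rcases List.mem_append.mp hmem with h1 | h1
        · by_cases hm : cid = -1
          · simp only [hm, ne_eq, not_true_eq_false, if_false]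
            exact hinv x hx h1
          · simp only [ne_eq, hm, not_false_eq_true, if_true]
            exact contains_add_of_contains (hinv x hx h1)
        · rw [List.mem_singleton.mp h1]
          have hm : cid ≠ -1 := List.mem_singleton.mp h1 ▸ hx
          simp only [ne_eq, hm, not_false_eq_true, if_true]
          exact contains_add_self used cid
      have hAB := ih r (c + 1) (if cid ≠ -1 then PySem.Set.add used cid else used)
        (parts ++ [make_td cid (PySem.Dict.getD (PySem.Dict.mk content) cid "")
          (if cid = -1 then 1 else get_rowspan cs r c cid)
          (if cid = -1 then 1 else get_colspan cs r c cid)]) hr hrest.symm hinv1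
      constructor
      · simp only [rowLoopA, rowLoopB, hused', Bool.false_eq_true, if_false, make_td]
        rw [e1, e2]
        exact (ih r (c + 1) _ _ hr hrest.symm hinv1).1
      · intro x hx hmem
        rw [hidx] at hmem
        simp only [rowLoopA, hused', Bool.false_eq_true, if_false]
        exact hAB.2 x hx hmem

theorem tableLoop_eq' (cs : List (List Int)) (content : List (Int × String))
    (hpre : Pre_pack_to_html_str cs content) :
    ∀ (rows : List (List Int)) (r : Nat) (used : PySem.Set Int) (parts : List String),
      cs.drop r = rows →
      (∀ x : Int, x ≠ -1 → x ∈ (cs.take r).flatten → PySem.Set.contains used x = true) →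
      tableLoopA cs content r rows used parts = tableLoopB content (cs.map rrun) (drun cs) r rows used parts := by
  intro rows
  induction rows with
  | nil => intro r used parts _ _; rfl
  | cons row rrest ih =>
    intro r used parts hdrop hinv
    have hr : r < cs.length := by
      by_contra h
      rw [List.drop_eq_nil_of_le (by omega)] at hdrop
      simp at hdrop
    have hsplit : cs.drop r = cs[r] :: cs.drop (r + 1) := List.drop_eq_getElem_cons hr
    rw [hdrop] at hsplit
    obtain ⟨hrow, hrrest⟩ : row = cs[r] ∧ rrest = cs.drop (r + 1) := by
      have := hsplit
      exact ⟨by injection this, by injection this⟩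
    have hgd : cs.getD r [] = cs[r] := List.getD_eq_getElem cs [] hr
    have h := rowLoop_eq cs content hpre row r 0 used (parts ++ ["<tr>"]) hr
      (by rw [List.drop_zero, hgd, hrow]) (by
        intro x hx hmem
        exact hinv x hx (by simpa [priorCells] using hmem))
    simp only [tableLoopA, tableLoopB]
    rw [← h.1]
    exact ih (r + 1) (rowLoopA cs content r 0 row used (parts ++ ["<tr>"])).1 _ hrrest.symm (by
      intro x hx hmem
      rw [List.take_succ_eq_append_getElem hr, List.flatten_append] at hmem
      apply h.2 x hx
      simp only [priorCells, Nat.zero_add]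
      rw [hgd, ← hrow]
      simpa [List.take_length, hrow] using hmem)


-- ===== VERDICT (by name: the statement is the Claim_ definition above) =====
theorem pack_to_html_str_spec : Claim_equal_pack_to_html_str := by
  intro cs content _ hpre
  unfold Spec_pack_to_html_str pack_to_html_str pack_to_html_str_alt
  rw [tableLoop_eq' cs content hpre cs 0 PySem.Set.empty ["<table>"] (by simp) (by simp)]
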